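-- pv_equiv track=rewrite | github.com/nyucel/blm2010 | final/170401032.py | xiyi
-- ===== SOURCE A (Python) =====
-- def xiyi(vakalar,derece):
--     xiyi=[]
--     xiyi.append(sum(vakalar))
--     for i in range(1,7,1): #formulde xiyinin derecesi m ile bitiyor.
--         q=0
--         for j in range(derece):
--             q+=(j+1)**i*vakalar[j]
--         xiyi.append(q)
--     return xiyi
-- ===== SOURCE B (Python) =====
-- def xiyi(vakalar, derece):
--     # Abel summation (summation by parts):
--     #   sum_{j<n} (j+1)**i * v[j] = sum_{j<n} ((j+1)**i - j**i) * t[j]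
--     # where t[j] = v[j] + v[j+1] + ... + v[n-1] is a suffix total, so one
--     # reverse pass with a running suffix total replaces the six direct passes.
--     t = 0
--     accs = [0, 0, 0, 0, 0, 0]
--     for j in range(max(derece, 0) - 1, -1, -1):
--         t += vakalar[j]
--         for i in range(6):
--             accs[i] += ((j + 1) ** (i + 1) - j ** (i + 1)) * t
--     return [sum(vakalar)] + accs
-- ===== Notes on version B (the rewrite author's own statement) =====
-- stated objective: alternative
-- what changed: B uses Abel summation (summation by parts): one reverse pass maintaining a running suffix total t, weighting it by the finite differences (j+1)^i - j^i, instead of A's six independent forward passes with direct powers (j+1)^i.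
import Mathlib
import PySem

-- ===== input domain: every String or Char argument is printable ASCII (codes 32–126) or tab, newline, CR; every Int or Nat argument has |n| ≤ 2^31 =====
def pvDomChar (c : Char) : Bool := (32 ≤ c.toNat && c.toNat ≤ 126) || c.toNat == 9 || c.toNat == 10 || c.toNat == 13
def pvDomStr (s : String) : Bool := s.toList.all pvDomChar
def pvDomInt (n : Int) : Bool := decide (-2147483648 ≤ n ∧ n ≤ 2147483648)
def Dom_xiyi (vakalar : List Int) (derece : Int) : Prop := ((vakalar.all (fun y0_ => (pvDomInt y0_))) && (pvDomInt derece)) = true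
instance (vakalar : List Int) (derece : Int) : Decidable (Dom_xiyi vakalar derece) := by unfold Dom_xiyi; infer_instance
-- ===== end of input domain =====

-- B replaces A's six independent forward passes (direct powers (j+1)^i) by Abel summation
-- (summation by parts): one reverse pass carrying a running suffix total t, weighted by the
-- finite differences (j+1)^i - j^i; same cost class, genuinely different algorithm.

-- ===== PORT A =====
def xiyi (vakalar : List Int) (derece : Int) : List Int :=
  (PySem.List.pyRange 1 7 1).foldl
    (fun acc i =>
      acc ++ [(PySem.List.pyRange 0 derece 1).foldl
        (fun q j => q + (j + 1) ^ i.toNat * (PySem.List.pyGet? vakalar j).getD 0) 0])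
    [vakalar.sum]

-- ===== PORT B =====
-- one j-step of B: fold t += vakalar[j], then the inner 'for i in range(6)' updating accs
def xiyiStepB (vakalar : List Int) (st : Int × List Int) (j : Int) : Int × List Int :=
  let t := st.1 + (PySem.List.pyGet? vakalar j).getD 0
  (t, (List.range 6).foldl
      (fun a i => a.set i (a.getD i 0 + ((j + 1) ^ (i + 1) - j ^ (i + 1)) * t)) st.2)

def xiyi_alt (vakalar : List Int) (derece : Int) : List Int :=
  let accs :=
    ((PySem.List.pyRange (max derece 0 - 1) (-1) (-1)).foldl
      (xiyiStepB vakalar) (0, [0, 0, 0, 0, 0, 0])).2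
  vakalar.sum :: accs

-- ===== PRECONDITION & SPEC =====
-- Pre_ excludes exactly the inputs where vakalar[j] raises IndexError in both programs
def Pre_xiyi (vakalar : List Int) (derece : Int) : Prop := derece ≤ (vakalar.length : Int)
instance (vakalar : List Int) (derece : Int) : Decidable (Pre_xiyi vakalar derece) := by
  unfold Pre_xiyi; infer_instance
def pvWitness_xiyi : List Int × Int := ([5, -3, 7, 2], 4)

def Spec_xiyi (vakalar : List Int) (derece : Int) (out : List Int) : Prop := out = xiyi_alt vakalar derece
instance (vakalar : List Int) (derece : Int) (out : List Int) : Decidable (Spec_xiyi vakalar derece out) := by unfold Spec_xiyi; infer_instance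

-- ===== CLAIM (what is proved, stated in full; the proofs are below) =====
def Claim_equal_xiyi : Prop := ∀ (vakalar : List Int) (derece : Int), Dom_xiyi vakalar derece → Pre_xiyi vakalar derece → Spec_xiyi vakalar derece (xiyi vakalar derece)

-- ===== LEMMAS AND PROOFS =====

-- value at index j (in-range on Pre_), prefix sums, and B's weighted partial sums
def pvV (vakalar : List Int) (j : Int) : Int := (PySem.List.pyGet? vakalar j).getD 0

def pvS (vakalar : List Int) (m : Nat) : Int :=
  ((List.range m).map (fun j : Nat => pvV vakalar (j : Int))).sum

def pvP (vakalar : List Int) (e : Nat) (m : Nat) (t0 : Int) : Int :=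
  ((List.range m).map (fun j : Nat =>
    (((j : Int) + 1) ^ e - (j : Int) ^ e) * (t0 + pvS vakalar m - pvS vakalar j))).sum

theorem pvS_succ (vak : List Int) (m : Nat) :
    pvS vak (m + 1) = pvS vak m + pvV vak (m : Int) := by
  simp [pvS, List.range_succ]

-- one step of B's fold on an explicit 6-element accumulator list
theorem pvStepB_eq (vak : List Int) (t0 a1 a2 a3 a4 a5 a6 : Int) (j : Int) :
    xiyiStepB vak (t0, [a1, a2, a3, a4, a5, a6]) j =
      (t0 + pvV vak j,
       [a1 + ((j + 1) ^ 1 - j ^ 1) * (t0 + pvV vak j),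
        a2 + ((j + 1) ^ 2 - j ^ 2) * (t0 + pvV vak j),
        a3 + ((j + 1) ^ 3 - j ^ 3) * (t0 + pvV vak j),
        a4 + ((j + 1) ^ 4 - j ^ 4) * (t0 + pvV vak j),
        a5 + ((j + 1) ^ 5 - j ^ 5) * (t0 + pvV vak j),
        a6 + ((j + 1) ^ 6 - j ^ 6) * (t0 + pvV vak j)]) := by
  simp [xiyiStepB, pvV, List.range_succ, List.foldl, List.set, List.getD]

theorem pvP_succ (vak : List Int) (e : Nat) (m : Nat) (t0 : Int) :
    pvP vak e (m + 1) t0 =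
      pvP vak e m (t0 + pvV vak (m : Int)) +
        (((m : Int) + 1) ^ e - (m : Int) ^ e) * (t0 + pvV vak (m : Int)) := by
  unfold pvP
  rw [pvS_succ, List.range_succ, List.map_append, List.sum_append]
  have h : (fun j : Nat =>
      (((j : Int) + 1) ^ e - (j : Int) ^ e) * (t0 + (pvS vak m + pvV vak (m : Int)) - pvS vak j)) =
      (fun j : Nat =>
      (((j : Int) + 1) ^ e - (j : Int) ^ e) * ((t0 + pvV vak (m : Int)) + pvS vak m - pvS vak j)) := by
    funext j; ring
  rw [h]
  simp

-- the B fold, on the descending index list, computes t0 + prefix-sum and the six weighted sums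
theorem pvAccFold (vak : List Int) (m : Nat) (t0 a1 a2 a3 a4 a5 a6 : Int) :
    (((List.range m).map (fun k : Nat => (k : Int))).reverse).foldl (xiyiStepB vak)
        (t0, [a1, a2, a3, a4, a5, a6]) =
      (t0 + pvS vak m,
       [a1 + pvP vak 1 m t0, a2 + pvP vak 2 m t0, a3 + pvP vak 3 m t0,
        a4 + pvP vak 4 m t0, a5 + pvP vak 5 m t0, a6 + pvP vak 6 m t0]) := by
  induction m generalizing t0 a1 a2 a3 a4 a5 a6 with
  | zero => simp [pvS, pvP]
  | succ m ih =>
    rw [List.range_succ, List.map_append, List.reverse_append]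
    simp only [List.map_cons, List.map_nil, List.reverse_cons, List.reverse_nil,
      List.nil_append, List.cons_append, List.foldl_cons]
    rw [pvStepB_eq, ih]
    rw [pvS_succ, pvP_succ, pvP_succ, pvP_succ, pvP_succ, pvP_succ, pvP_succ]
    simp only [Prod.mk.injEq, List.cons.injEq, and_true]
    refine ⟨by ring, by ring, by ring, by ring, by ring, by ring, by ring⟩

-- telescoping sum of the finite differences
theorem pvTel (e : Nat) (he : e ≠ 0) (m : Nat) :
    ((List.range m).map (fun j : Nat => (((j : Int) + 1) ^ e - (j : Int) ^ e))).sum = (m : Int) ^ e := by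
  induction m with
  | zero => simp [zero_pow he]
  | succ m ih =>
    rw [List.range_succ, List.map_append, List.sum_append, ih]
    simp only [List.map_cons, List.map_nil, List.sum_cons, List.sum_nil, add_zero]
    push_cast
    ring

-- summation by parts: B's weighted suffix-total sums equal A's direct power sums
theorem pvParts (vak : List Int) (e : Nat) (he : e ≠ 0) (m : Nat) :
    pvP vak e m 0 =
      ((List.range m).map (fun j : Nat =>
        (((j : Int) + 1) ^ e * (PySem.List.pyGet? vak (j : Int)).getD 0))).sum := by
  induction m with
  | zero => simp [pvP]
  | succ m ih =>
    rw [pvP_succ]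
    have hsplit : pvP vak e m (0 + pvV vak (m : Int)) =
        pvP vak e m 0 +
          ((List.range m).map (fun j : Nat => (((j : Int) + 1) ^ e - (j : Int) ^ e))).sum *
            pvV vak (m : Int) := by
      unfold pvP
      have h : (fun j : Nat =>
          (((j : Int) + 1) ^ e - (j : Int) ^ e) * ((0 + pvV vak (m : Int)) + pvS vak m - pvS vak j)) =
          (fun j : Nat =>
          (((j : Int) + 1) ^ e - (j : Int) ^ e) * (0 + pvS vak m - pvS vak j) +
          (((j : Int) + 1) ^ e - (j : Int) ^ e) * pvV vak (m : Int)) := by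
        funext j; ring
      rw [h, PySem.List.sum_map_add_int]
      rw [← List.sum_map_mul_right]
    rw [hsplit, pvTel e he, ih, List.range_succ, List.map_append, List.sum_append]
    simp only [List.map_cons, List.map_nil, List.sum_cons, List.sum_nil, pvV]
    ring

-- A's inner loop with accumulator a is a + the sum of the mapped terms
theorem pvSumFold (t : Int → Int) (js : List Int) (a : Int) :
    js.foldl (fun q j => q + t j) a = a + (js.map t).sum := by
  induction js generalizing a with
  | nil => simp
  | cons j js ih => simp [List.foldl, ih (a + t j), add_assoc]

-- A's range(derece) as a mapped Nat range (empty when derece < 0)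
theorem pvRangeA (derece : Int) :
    PySem.List.pyRange 0 derece 1 = (List.range derece.toNat).map (fun k : Nat => (k : Int)) := by
  by_cases h : 0 ≤ derece
  · conv_lhs => rw [show derece = ((derece.toNat : Nat) : Int) from by omega]
    exact PySem.List.pyRange_zero_nat _
  · have h1 : derece ≤ 0 := by omega
    rw [PySem.List.pyRange_one_eq_nil h1]
    have h0 : derece.toNat = 0 := by omega
    simp [h0]

-- B's descending range is the reverse of that same list
theorem pvRangeB (derece : Int) :
    PySem.List.pyRange (max derece 0 - 1) (-1) (-1) =
      (((List.range derece.toNat).map (fun k : Nat => (k : Int))).reverse) := by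
  have hmax : max derece 0 = ((derece.toNat : Nat) : Int) := by omega
  rw [hmax, PySem.List.pyRange_neg_one_eq_reverse]
  rw [show (-1 : Int) + 1 = 0 from by norm_num,
      show ((derece.toNat : Nat) : Int) - 1 + 1 = ((derece.toNat : Nat) : Int) from by ring]
  rw [PySem.List.pyRange_zero_nat]

-- ===== VERDICT (by name: the statement is the Claim_ definition above) =====
theorem xiyi_spec : Claim_equal_xiyi := by
  intro vakalar derece _ _
  unfold Spec_xiyi xiyi xiyi_alt
  have h17 : PySem.List.pyRange 1 7 1 = [1, 2, 3, 4, 5, 6] := by decide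
  rw [h17]
  simp only [List.foldl]
  rw [pvRangeA, pvRangeB, pvAccFold]
  rw [pvSumFold, pvSumFold, pvSumFold, pvSumFold, pvSumFold, pvSumFold]
  simp only [List.map_map, Function.comp_def,
    show Int.toNat 1 = 1 from rfl, show Int.toNat 2 = 2 from rfl,
    show Int.toNat 3 = 3 from rfl, show Int.toNat 4 = 4 from rfl,
    show Int.toNat 5 = 5 from rfl, show Int.toNat 6 = 6 from rfl]
  rw [← pvParts vakalar 1 (by decide), ← pvParts vakalar 2 (by decide),
      ← pvParts vakalar 3 (by decide), ← pvParts vakalar 4 (by decide),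
      ← pvParts vakalar 5 (by decide), ← pvParts vakalar 6 (by decide)]
  simp
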